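-- pv_equiv track=rewrite | github.com/davidaayers/advent-of-code-2023 | day07/day7_funcs.py | build_card_dict
-- ===== SOURCE A (Python) =====
-- def build_card_dict(hand):
--     cards = dict()
--     for card in sorted(hand):
--         if card in cards:
--             cards[card] += 1
--         else:
--             cards[card] = 1
--     return cards
-- ===== SOURCE B (Python) =====
-- def build_card_dict(hand):
--     s = sorted(hand)
--     cards = {}
--     i = 0
--     n = len(s)
--     while i < n:
--         j = i + 1
--         while j < n and s[j] == s[i]:
--             j += 1
--         cards[s[i]] = j - i
--         i = j
--     return cards
-- ===== Notes on version B (the rewrite author's own statement) =====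
-- stated objective: alternative
-- what changed: Replaces the per-card membership-test/increment dict loop with run-length grouping over the sorted cards: each maximal run of equal cards is consumed at once and its length stored, so no dict lookup or increment per element.
import Mathlib
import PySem

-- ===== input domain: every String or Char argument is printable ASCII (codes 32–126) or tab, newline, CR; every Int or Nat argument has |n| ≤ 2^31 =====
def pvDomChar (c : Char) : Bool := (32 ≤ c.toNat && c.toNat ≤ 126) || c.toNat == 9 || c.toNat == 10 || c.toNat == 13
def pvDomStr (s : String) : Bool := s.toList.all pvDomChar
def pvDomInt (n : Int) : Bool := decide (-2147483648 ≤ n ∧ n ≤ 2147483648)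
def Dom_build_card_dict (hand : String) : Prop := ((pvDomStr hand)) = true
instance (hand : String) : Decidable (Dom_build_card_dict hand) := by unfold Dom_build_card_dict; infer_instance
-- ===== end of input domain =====

-- B re-implements the count dict by run-length grouping of the sorted hand (alternative decomposition, same cost).

-- a one-character Python string (the loop variable 'card' iterating a str)
def pvKey (c : Char) : String := String.ofList [c]

-- ===== PORT A =====
-- for card in sorted(hand): if card in cards: cards[card] += 1 else: cards[card] = 1
def build_card_dict (hand : String) : List (String × Int) :=
  ((PySem.List.sorted hand.toList (fun c => c) false).foldl
    (fun cards card =>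
      if cards.contains (pvKey card) then
        cards.insert (pvKey card) (cards.getD (pvKey card) 0 + 1)
      else
        cards.insert (pvKey card) 1)
    PySem.Dict.empty).items

-- ===== PORT B =====
-- the two-index while loop of Source B: consume one maximal run of equal cards per step
def pvRuns : List Char → List (String × Int)
  | [] => []
  | c :: rest =>
      (pvKey c, 1 + (rest.takeWhile (· == c)).length) :: pvRuns (rest.dropWhile (· == c))
termination_by l => l.length
decreasing_by
  simp only [List.length_cons]
  exact Nat.lt_succ_of_le (List.length_dropWhile_le _ _)

def build_card_dict_alt (hand : String) : List (String × Int) :=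
  pvRuns (PySem.List.sorted hand.toList (fun c => c) false)

-- ===== PRECONDITION & SPEC =====
def Spec_build_card_dict (hand : String) (out : List (String × Int)) : Prop := out = build_card_dict_alt hand
instance (hand : String) (out : List (String × Int)) : Decidable (Spec_build_card_dict hand out) := by unfold Spec_build_card_dict; infer_instance

-- ===== CLAIM (what is proved, stated in full; the proofs are below) =====
def Claim_equal_build_card_dict : Prop := ∀ (hand : String), Dom_build_card_dict hand → Spec_build_card_dict hand (build_card_dict hand)

-- ===== LEMMAS AND PROOFS =====

theorem pvKey_inj {a b : Char} (h : pvKey a = pvKey b) : a = b := by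
  have := congrArg String.toList h
  simp [pvKey] at this
  exact this

-- A's loop body is insert (getD + 1) in both branches
theorem pvStepEq :
    (fun (cards : PySem.Dict String Int) card =>
      if cards.contains (pvKey card) then
        cards.insert (pvKey card) (cards.getD (pvKey card) 0 + 1)
      else
        cards.insert (pvKey card) 1) =
    (fun (cards : PySem.Dict String Int) card =>
      cards.insert (pvKey card) (cards.getD (pvKey card) 0 + 1)) := by
  funext cards card
  by_cases h : cards.contains (pvKey card) = true
  · simp [h]
  · have h' : cards.contains (pvKey card) = false := by
      cases hc : cards.contains (pvKey card) <;> simp_all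
    simp [h', PySem.Dict.getD_of_not_contains cards (0:Int) h']

-- a run of copies of c folded into a dict already holding (pvKey c, m)
theorem pvFoldRun (run : List Char) (c : Char) :
    ∀ (d : PySem.Dict String Int) (m : Int), (∀ x ∈ run, x = c) →
    run.foldl (fun cards card => cards.insert (pvKey card) (cards.getD (pvKey card) 0 + 1))
      (d.insert (pvKey c) m) = d.insert (pvKey c) (m + run.length) := by
  induction run with
  | nil => intro d m _; simp
  | cons x xs ih =>
      intro d m hall
      have hx : x = c := hall x (by simp)
      subst hx
      simp only [List.foldl_cons, PySem.Dict.getD_insert_self, PySem.Dict.insert_insert_self]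
      rw [ih d (m + 1) (fun y hy => hall y (by simp [hy]))]
      simp only [List.length_cons]
      congr 1
      push_cast
      ring

-- main invariant: folding a sorted run-list into a dict with fresh keys appends its runs
theorem pvFoldSorted (l : List Char) :
    ∀ (d : PySem.Dict String Int), l.Pairwise (· ≤ ·) →
    (∀ x ∈ l, d.contains (pvKey x) = false) →
    (l.foldl (fun cards card => cards.insert (pvKey card) (cards.getD (pvKey card) 0 + 1)) d).items
      = d.items ++ pvRuns l := by
  induction l using pvRuns.induct with
  | case1 => intro d _ _; simp [pvRuns]
  | case2 c rest ih =>
      intro d hpw hfresh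
      have hcd : d.contains (pvKey c) = false := hfresh c (by simp)
      have hsplit : rest = rest.takeWhile (· == c) ++ rest.dropWhile (· == c) :=
        (List.takeWhile_append_dropWhile).symm
      have hrun : ∀ x ∈ rest.takeWhile (· == c), x = c := by
        intro x hx
        have := List.mem_takeWhile_imp hx
        simpa using this
      -- every element of the dropWhile tail differs from c
      have hrestle : ∀ x ∈ rest, c ≤ x := by
        intro x hx
        exact (List.pairwise_cons.mp hpw).1 x hx
      have hne : ∀ x ∈ rest.dropWhile (· == c), x ≠ c := by
        intro x hx
        have hpwrest : rest.Pairwise (· ≤ ·) := (List.pairwise_cons.mp hpw).2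
        have hpwdrop : (rest.dropWhile (· == c)).Pairwise (· ≤ ·) :=
          hpwrest.sublist (List.dropWhile_sublist _)
        cases hd : rest.dropWhile (· == c) with
        | nil => simp [hd] at hx
        | cons h t =>
            have hhne : ¬ (h == c) = true := by
              have := List.head?_dropWhile_not (· == c) rest
              rw [hd] at this
              simpa using this
            have hhne' : h ≠ c := fun h' => hhne (by simp [h'])
            have hhc : c < h := by
              have hhm : h ∈ rest := (List.dropWhile_sublist _).subset (by rw [hd]; exact List.mem_cons_self)
              exact lt_of_le_of_ne (hrestle h hhm) (Ne.symm hhne')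
            rw [hd] at hx
            rcases List.mem_cons.mp hx with rfl | hxt
            · exact hhne'
            · have : h ≤ x := (List.pairwise_cons.mp (by rw [hd] at hpwdrop; exact hpwdrop)).1 x hxt
              exact fun hxc => absurd (hxc ▸ this) (not_le.mpr hhc)
      -- fold the head + its run
      have hfold : (c :: rest).foldl
          (fun cards card => cards.insert (pvKey card) (cards.getD (pvKey card) 0 + 1)) d
          = (rest.dropWhile (· == c)).foldl
              (fun cards card => cards.insert (pvKey card) (cards.getD (pvKey card) 0 + 1))
              (d.insert (pvKey c) (1 + (rest.takeWhile (· == c)).length)) := by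
        conv_lhs => rw [show (c :: rest) = (c :: rest.takeWhile (· == c)) ++ rest.dropWhile (· == c) by
          exact congrArg (c :: ·) hsplit]
        rw [List.foldl_append]
        congr 1
        simp only [List.foldl_cons, PySem.Dict.getD_of_not_contains _ _ hcd]
        rw [pvFoldRun _ c d (0 + 1) hrun]
        norm_num
      rw [hfold]
      have hpwdrop : (rest.dropWhile (· == c)).Pairwise (· ≤ ·) :=
        ((List.pairwise_cons.mp hpw).2).sublist (List.dropWhile_sublist _)
      have hfresh' : ∀ x ∈ rest.dropWhile (· == c),
          ((d.insert (pvKey c) (1 + (rest.takeWhile (· == c)).length)).contains (pvKey x)) = false := by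
        intro x hx
        rw [PySem.Dict.contains_insert]
        have h1 : (pvKey x == pvKey c) = false := by
          simp only [beq_eq_false_iff_ne, ne_eq]
          exact fun h => hne x hx (pvKey_inj h)
        have h2 : d.contains (pvKey x) = false :=
          hfresh x (by exact List.mem_cons_of_mem _ ((List.dropWhile_sublist _).subset hx))
        simp [h1, h2]
      rw [ih (d.insert (pvKey c) (1 + (rest.takeWhile (· == c)).length)) hpwdrop hfresh']
      rw [PySem.Dict.items_insert_of_not_contains _ _ hcd]
      simp [pvRuns]

-- ===== VERDICT (by name: the statement is the Claim_ definition above) =====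
theorem build_card_dict_spec : Claim_equal_build_card_dict := by
  intro hand _
  unfold Spec_build_card_dict build_card_dict build_card_dict_alt
  rw [pvStepEq]
  rw [pvFoldSorted _ PySem.Dict.empty
    (PySem.List.sorted_pairwise hand.toList (fun c => c))
    (fun x _ => by simp)]
  simp [PySem.Dict.empty]
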